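-- pv_equiv track=rewrite | github.com/nanless/DataFilter | tts_speech_voiceprint_filter_old/compute_similarity_prompts.py | _pick_best_subdir_for_json
-- ===== SOURCE A (Python) =====
-- from typing import Dict, List, Tuple, Optional
--
-- def _pick_best_subdir_for_json(json_stem: str, subdirs: List[str]) -> Optional[str]:
--     """
--     Pick the most plausible subdir for a json file:
--       1) exact name match
--       2) json_stem contained in subdir name
--       3) subdir name contained in json_stem
--       4) fallback: None
--     """
--     if json_stem in subdirs:
--         return json_stem
--     contains = [sd for sd in subdirs if json_stem in sd]
--     if contains:
--         return sorted(contains, key=lambda s: len(s))[0]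
--     contained = [sd for sd in subdirs if sd in json_stem]
--     if contained:
--         return sorted(contained, key=lambda s: -len(s))[0]
--     return None
-- ===== SOURCE B (Python) =====
-- from typing import List, Optional
--
-- def _pick_best_subdir_for_json(json_stem: str, subdirs: List[str]) -> Optional[str]:
--     exact = False
--     best_contains = None   # shortest subdir containing json_stem, earliest wins ties
--     best_contained = None  # longest subdir contained in json_stem, earliest wins ties
--     for sd in subdirs:
--         if sd == json_stem:
--             exact = True
--         if json_stem in sd and (best_contains is None or len(sd) < len(best_contains)):
--             best_contains = sd
--         if sd in json_stem and (best_contained is None or len(sd) > len(best_contained)):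
--             best_contained = sd
--     if exact:
--         return json_stem
--     if best_contains is not None:
--         return best_contains
--     return best_contained
-- ===== Notes on version B (the rewrite author's own statement) =====
-- stated objective: simpler
-- what changed: Replaced the membership test plus two filter-and-sort passes with one loop over subdirs that tracks an exact-match flag, the shortest containing candidate and the longest contained candidate with strict length comparisons (so the earliest element wins ties, matching the stable sorts).
import Mathlib
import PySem

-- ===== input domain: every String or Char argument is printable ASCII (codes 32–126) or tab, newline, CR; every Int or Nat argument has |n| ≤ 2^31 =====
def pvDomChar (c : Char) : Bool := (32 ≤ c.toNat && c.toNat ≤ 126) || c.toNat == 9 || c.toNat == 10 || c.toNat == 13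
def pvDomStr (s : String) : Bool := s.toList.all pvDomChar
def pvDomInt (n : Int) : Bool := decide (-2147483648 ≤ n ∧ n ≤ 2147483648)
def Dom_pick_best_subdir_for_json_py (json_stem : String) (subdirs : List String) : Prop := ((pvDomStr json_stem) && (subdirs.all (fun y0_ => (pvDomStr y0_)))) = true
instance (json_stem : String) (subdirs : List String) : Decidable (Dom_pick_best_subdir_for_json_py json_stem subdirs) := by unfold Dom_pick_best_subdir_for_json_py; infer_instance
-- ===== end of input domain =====

-- B replaces A's membership test plus two filter-and-sort passes by a single loop that tracks an
-- exact-match flag, the shortest containing candidate and the longest contained candidate (simpler).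

-- ===== PORT A =====
def pick_best_subdir_for_json_py (json_stem : String) (subdirs : List String) : Option String :=
  if subdirs.contains json_stem then some json_stem
  else if subdirs.filter (fun sd => PySem.Str.isIn json_stem sd) ≠ [] then
    PySem.List.pyGet? (PySem.List.sorted (subdirs.filter (fun sd => PySem.Str.isIn json_stem sd)) (fun s => PySem.Str.len s)) 0
  else if subdirs.filter (fun sd => PySem.Str.isIn sd json_stem) ≠ [] then
    PySem.List.pyGet? (PySem.List.sorted (subdirs.filter (fun sd => PySem.Str.isIn sd json_stem)) (fun s => -PySem.Str.len s)) 0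
  else none

-- ===== PORT B =====
-- best_contains update: keep the incumbent unless the new candidate is strictly shorter
def pbUpdMin (sd : String) (best : Option String) : Option String :=
  match best with
  | none => some sd
  | some b => if PySem.Str.len sd < PySem.Str.len b then some sd else some b

-- best_contained update: keep the incumbent unless the new candidate is strictly longer
def pbUpdMax (sd : String) (best : Option String) : Option String :=
  match best with
  | none => some sd
  | some b => if PySem.Str.len sd > PySem.Str.len b then some sd else some b

-- after the loop: exact match first, then best containing, then best contained
def pbFinish (json_stem : String) (st : Bool × Option String × Option String) : Option String :=
  if st.1 then some json_stem
  else
    match st.2.1 with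
    | some bc => some bc
    | none => st.2.2

def pick_best_subdir_for_json_py_alt (json_stem : String) (subdirs : List String) : Option String :=
  pbFinish json_stem (subdirs.foldl (fun st sd =>
    ( st.1 || (sd == json_stem),
      if PySem.Str.isIn json_stem sd then pbUpdMin sd st.2.1 else st.2.1,
      if PySem.Str.isIn sd json_stem then pbUpdMax sd st.2.2 else st.2.2 ))
    (false, none, none))

-- ===== PRECONDITION & SPEC =====
def Spec_pick_best_subdir_for_json_py (json_stem : String) (subdirs : List String) (out : Option String) : Prop := out = pick_best_subdir_for_json_py_alt json_stem subdirs
instance (json_stem : String) (subdirs : List String) (out : Option String) : Decidable (Spec_pick_best_subdir_for_json_py json_stem subdirs out) := by unfold Spec_pick_best_subdir_for_json_py; infer_instance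

-- ===== CLAIM (what is proved, stated in full; the proofs are below) =====
def Claim_equal_pick_best_subdir_for_json_py : Prop := ∀ (json_stem : String) (subdirs : List String), Dom_pick_best_subdir_for_json_py json_stem subdirs → Spec_pick_best_subdir_for_json_py json_stem subdirs (pick_best_subdir_for_json_py json_stem subdirs)

-- ===== LEMMAS AND PROOFS =====

-- first element of minimal key, as a left fold (what B's strict-< updates compute)
def firstMinBy (key : String → Int) (l : List String) : Option String :=
  l.foldl (fun st x =>
    match st with
    | none => some x
    | some h => if key x < key h then some x else some h) none

lemma head?_insertBy (key : String → Int) (x : String) (acc : List String) :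
    (PySem.List.insertBy (fun a b => decide (key a < key b)) x acc).head? =
      (match acc.head? with
       | none => some x
       | some h => if key x < key h then some x else some h) := by
  cases acc with
  | nil => simp [PySem.List.insertBy]
  | cons y ys =>
      simp only [PySem.List.insertBy, List.head?_cons]
      split_ifs with h <;> simp_all

lemma head?_foldl_insertBy (key : String → Int) :
    ∀ (l : List String) (acc : List String),
      (l.foldl (fun acc x => PySem.List.insertBy (fun a b => decide (key a < key b)) x acc) acc).head? =
        l.foldl (fun st x =>
          match st with
          | none => some x
          | some h => if key x < key h then some x else some h) acc.head? := by
  intro l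
  induction l with
  | nil => intro acc; rfl
  | cons x t ih =>
      intro acc
      simp only [List.foldl_cons]
      rw [ih, head?_insertBy]

lemma head?_sorted (key : String → Int) (l : List String) :
    (PySem.List.sorted l key).head? = firstMinBy key l := by
  rw [PySem.List.sorted_eq_foldl_insertBy]
  exact head?_foldl_insertBy key l []

lemma firstMinBy_ne_none (key : String → Int) (l : List String) (h : l ≠ []) :
    ∃ m, firstMinBy key l = some m := by
  cases l with
  | nil => exact absurd rfl h
  | cons x t =>
      unfold firstMinBy
      simp only [List.foldl_cons]
      clear h
      induction t generalizing x with
      | nil => exact ⟨x, rfl⟩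
      | cons y t ih =>
          simp only [List.foldl_cons]
          by_cases hy : key y < key x
          · simpa [hy] using ih y
          · simpa [hy] using ih x

lemma foldl_triple (json_stem : String) :
    ∀ (l : List String) (a : Bool) (b c : Option String),
      l.foldl (fun st sd =>
        ( st.1 || (sd == json_stem),
          if PySem.Str.isIn json_stem sd then pbUpdMin sd st.2.1 else st.2.1,
          if PySem.Str.isIn sd json_stem then pbUpdMax sd st.2.2 else st.2.2 )) (a, b, c)
        = (l.foldl (fun b sd => b || (sd == json_stem)) a,
           l.foldl (fun st sd => if PySem.Str.isIn json_stem sd then pbUpdMin sd st else st) b,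
           l.foldl (fun st sd => if PySem.Str.isIn sd json_stem then pbUpdMax sd st else st) c) := by
  intro l
  induction l with
  | nil => intro a b c; rfl
  | cons x t ih => intro a b c; simp only [List.foldl_cons]; exact ih _ _ _

lemma foldl_or_beq (j : String) :
    ∀ (l : List String) (a : Bool),
      l.foldl (fun b sd => b || (sd == j)) a = (a || l.contains j) := by
  intro l
  induction l with
  | nil => intro a; simp
  | cons x t ih =>
      intro a
      simp only [List.foldl_cons, List.contains_cons, ih]
      by_cases hx : x = j
      · simp [hx]
      · have h1 : (x == j) = false := by simp [hx]
        have h2 : (j == x) = false := by simp [Ne.symm hx]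
        simp [h1, h2]

lemma foldl_if_filter (p : String → Bool) (g : Option String → String → Option String) :
    ∀ (l : List String) (st : Option String),
      l.foldl (fun st sd => if p sd then g st sd else st) st = (l.filter p).foldl g st := by
  intro l
  induction l with
  | nil => intro st; rfl
  | cons x t ih =>
      intro st
      by_cases hx : p x <;> simp [List.foldl_cons, hx, ih]

lemma foldl_pbUpdMin (l : List String) :
    l.foldl (fun st sd => pbUpdMin sd st) none = firstMinBy (fun s => PySem.Str.len s) l := by
  rfl

lemma foldl_pbUpdMax (l : List String) :
    l.foldl (fun st sd => pbUpdMax sd st) none = firstMinBy (fun s => -PySem.Str.len s) l := by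
  have h : (fun (st : Option String) (sd : String) => pbUpdMax sd st)
      = (fun (st : Option String) (x : String) =>
          match st with
          | none => some x
          | some h => if (-PySem.Str.len x) < (-PySem.Str.len h) then some x else some h) := by
    funext st sd
    cases st with
    | none => rfl
    | some b => simp only [pbUpdMax, gt_iff_lt, neg_lt_neg_iff]
  rw [h]
  rfl

-- ===== VERDICT (by name: the statement is the Claim_ definition above) =====
theorem pick_best_subdir_for_json_py_spec : Claim_equal_pick_best_subdir_for_json_py := by
  intro json_stem subdirs _
  unfold Spec_pick_best_subdir_for_json_py
  unfold pick_best_subdir_for_json_py pick_best_subdir_for_json_py_alt pbFinish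
  rw [foldl_triple json_stem, foldl_or_beq, Bool.false_or,
      foldl_if_filter, foldl_if_filter, foldl_pbUpdMin, foldl_pbUpdMax]
  change _ =
    (if subdirs.contains json_stem = true then some json_stem
     else
       match firstMinBy (fun s => PySem.Str.len s)
           (subdirs.filter (fun sd => PySem.Str.isIn json_stem sd)) with
       | some bc => some bc
       | none =>
           firstMinBy (fun s => -PySem.Str.len s)
             (subdirs.filter (fun sd => PySem.Str.isIn sd json_stem)))
  by_cases hmem : subdirs.contains json_stem = true
  · rw [if_pos hmem, if_pos hmem]
  · rw [if_neg hmem, if_neg hmem]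
    by_cases hce : subdirs.filter (fun sd => PySem.Str.isIn json_stem sd) = []
    · rw [if_neg (not_not_intro hce), hce]
      by_cases hde : subdirs.filter (fun sd => PySem.Str.isIn sd json_stem) = []
      · rw [if_neg (not_not_intro hde), hde]
        rfl
      · rw [if_pos hde, PySem.List.pyGet?_zero, ← List.head?_eq_getElem?, head?_sorted]
        rfl
    · rw [if_pos hce, PySem.List.pyGet?_zero, ← List.head?_eq_getElem?, head?_sorted]
      obtain ⟨m, hm⟩ := firstMinBy_ne_none _ _ hce
      rw [hm]
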